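-- pv_equiv track=rewrite | github.com/vadim-kosarev/tools | RAG/rag_chat.py | _parse_grid_table
-- ===== SOURCE A (Python) =====
-- def _parse_grid_table(lines: list[str]) -> tuple[list[str], list[list[str]]]:
--     """
--     Разбирает grid/RST-таблицу (разделители +----+) на заголовки и строки данных.
--
--     Поддерживает многострочные ячейки: текст из нескольких строк одной ячейки
--     конкатенируется через пробел. Вертикальные объединения (rowspan) не поддерживаются —
--     каждый блок между разделителями считается отдельной строкой.
--     Возвращает (headers, data_rows).
--     """
--     # Строки-разделители: начинаются с '+' и содержат '-'
--     sep_indices = [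
--         i for i, line in enumerate(lines)
--         if line.strip().startswith("+") and "-" in line
--     ]
--
--     if len(sep_indices) < 2:
--         return [], []
--
--     # Определяем границы столбцов по первой строке-разделителю
--     first_sep = lines[sep_indices[0]].rstrip()
--     col_starts = [i for i, c in enumerate(first_sep) if c == "+"]
--
--     if len(col_starts) < 2:
--         return [], []
--
--     col_ranges: list[tuple[int, int]] = [
--         (col_starts[j] + 1, col_starts[j + 1])
--         for j in range(len(col_starts) - 1)
--     ]
--
--     def _extract_cells(row_lines: list[str]) -> list[str]:
--         """Извлекает текст ячеек из блока строк между разделителями."""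
--         cells = [""] * len(col_ranges)
--         for rline in row_lines:
--             if not rline.lstrip().startswith("|"):
--                 continue
--             padded = rline.rstrip()
--             for ci, (start, end) in enumerate(col_ranges):
--                 if start < len(padded):
--                     part = padded[start:end].strip()
--                     if part:
--                         cells[ci] = (cells[ci] + " " + part).strip()
--         return cells
--
--     headers: list[str] = []
--     data_rows: list[list[str]] = []
--
--     for block_idx in range(len(sep_indices) - 1):
--         block_start = sep_indices[block_idx] + 1
--         block_end = sep_indices[block_idx + 1]
--         row_lines = lines[block_start:block_end]
--         cells = _extract_cells(row_lines)
--
--         if not any(cells):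
--             continue
--
--         if not headers:
--             headers = cells
--         else:
--             # Пропускаем строки-дублики заголовка (иногда повторяется после первого +---+)
--             if cells != headers:
--                 data_rows.append(cells)
--
--     return headers, data_rows
-- ===== SOURCE B (Python) =====
-- def _parse_grid_table(lines: list[str]) -> tuple[list[str], list[list[str]]]:
--     """Single-pass state machine over lines: buffers the current block and
--     flushes it at each separator after the first; the trailing buffer (after
--     the last separator) is never flushed, and content before the first
--     separator is discarded when the first separator is seen."""
--     col_ranges = None
--     buf: list[str] = []
--     headers: list[str] = []
--     data_rows: list[list[str]] = []
--
--     for line in lines: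
--         if line.strip().startswith("+") and "-" in line:
--             if col_ranges is None:
--                 sep = line.rstrip()
--                 starts = [i for i, c in enumerate(sep) if c == "+"]
--                 col_ranges = [(s + 1, e) for s, e in zip(starts, starts[1:])]
--             else:
--                 cells = [""] * len(col_ranges)
--                 for rline in buf:
--                     if not rline.lstrip().startswith("|"):
--                         continue
--                     padded = rline.rstrip()
--                     for ci, (start, end) in enumerate(col_ranges):
--                         if start < len(padded):
--                             part = padded[start:end].strip()
--                             if part:
--                                 cells[ci] = (cells[ci] + " " + part).strip()
--                 if any(cells):
--                     if not headers:
--                         headers = cells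
--                     elif cells != headers:
--                         data_rows.append(cells)
--             buf = []
--         else:
--             buf.append(line)
--
--     return headers, data_rows
-- ===== Notes on version B (the rewrite author's own statement) =====
-- stated objective: alternative
-- what changed: B replaces A's precomputed separator-index list, index-pair loop and list slicing by a single-pass state machine over the lines that buffers the current block and flushes it at each separator after the first (column ranges taken from the first separator, trailing buffer dropped).
import Mathlib
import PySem

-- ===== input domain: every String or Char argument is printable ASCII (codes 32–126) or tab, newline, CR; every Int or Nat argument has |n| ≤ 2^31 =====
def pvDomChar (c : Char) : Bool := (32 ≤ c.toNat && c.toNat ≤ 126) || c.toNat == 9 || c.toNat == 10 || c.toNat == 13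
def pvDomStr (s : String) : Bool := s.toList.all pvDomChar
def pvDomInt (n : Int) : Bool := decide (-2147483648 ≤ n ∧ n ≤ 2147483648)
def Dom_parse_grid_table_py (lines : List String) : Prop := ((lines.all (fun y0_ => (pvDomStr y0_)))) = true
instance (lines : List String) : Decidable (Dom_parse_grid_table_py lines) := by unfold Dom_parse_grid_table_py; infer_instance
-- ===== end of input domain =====

-- B re-implements A as a single-pass state machine over the lines (buffer a block, flush it at each
-- separator after the first) instead of A's precomputed separator-index list with index slicing;
-- same return value (objective: alternative).

-- ===== PORT A =====

-- line.strip().startswith("+") and "-" in line  (the separator test, written verbatim in both Pythons)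
def pvIsSep (line : String) : Bool :=
  PySem.Str.startswith (PySem.Str.strip line) "+" && PySem.Str.isIn "-" line

-- A's helper _extract_cells (closure over col_ranges); B's Python contains this loop verbatim inline,
-- so B's port reuses this definition for that inline loop.
def pvExtractCells (col_ranges : List (Int × Int)) (row_lines : List String) : List String :=
  row_lines.foldl
    (fun cells rline =>
      if !(PySem.Str.startswith (PySem.Str.lstrip rline) "|") then cells
      else
        let padded := PySem.Str.rstrip rline
        (PySem.List.enumerate col_ranges 0).foldl
          (fun cells p =>
            if p.2.1 < (PySem.Str.len padded : Int) then
              let part := PySem.Str.strip (PySem.Str.slice padded (some p.2.1) (some p.2.2))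
              if part != "" then
                cells.set p.1.toNat (PySem.Str.strip (cells.getD p.1.toNat "" ++ " " ++ part))
              else cells
            else cells)
          cells)
    (List.replicate col_ranges.length "")

def parse_grid_table_py (lines : List String) : List String × List (List String) :=
  let sep_indices : List Int :=
    ((PySem.List.enumerate lines 0).filter (fun p => pvIsSep p.2)).map (fun p => p.1)
  if sep_indices.length < 2 then ([], [])
  else
    let first_sep := PySem.Str.rstrip (PySem.List.pyGetD lines (PySem.List.pyGetD sep_indices 0 0) "")
    let col_starts : List Int :=
      ((PySem.List.enumerate first_sep.toList 0).filter (fun p => p.2 == '+')).map (fun p => p.1)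
    if col_starts.length < 2 then ([], [])
    else
      let col_ranges : List (Int × Int) :=
        (PySem.List.pyRange 0 ((col_starts.length : Int) - 1) 1).map
          (fun j => (PySem.List.pyGetD col_starts j 0 + 1, PySem.List.pyGetD col_starts (j + 1) 0))
      (PySem.List.pyRange 0 ((sep_indices.length : Int) - 1) 1).foldl
        (fun st block_idx =>
          let block_start := PySem.List.pyGetD sep_indices block_idx 0 + 1
          let block_end := PySem.List.pyGetD sep_indices (block_idx + 1) 0
          let row_lines := PySem.List.slice lines (some block_start) (some block_end)
          let cells := pvExtractCells col_ranges row_lines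
          if !(cells.any (fun c => c != "")) then st
          else if st.1 = ([] : List String) then (cells, st.2)
          else if cells == st.1 then st
          else (st.1, st.2 ++ [cells]))
        ([], [])

-- ===== PORT B =====

-- B's loop body: state = (col_ranges?, buffered block, headers, data_rows); the cell-extraction
-- loop inlined in B's Python is the body of pvExtractCells above, verbatim.
def pvStepB (st : Option (List (Int × Int)) × List String × List String × List (List String))
    (line : String) : Option (List (Int × Int)) × List String × List String × List (List String) :=
  if pvIsSep line then
    match st.1 with
    | none =>
        let sep := PySem.Str.rstrip line
        let starts : List Int :=
          ((PySem.List.enumerate sep.toList 0).filter (fun p => p.2 == '+')).map (fun p => p.1)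
        (some ((starts.zip starts.tail).map (fun p => (p.1 + 1, p.2))), [], st.2.2.1, st.2.2.2)
    | some col_ranges =>
        let cells := pvExtractCells col_ranges st.2.1
        if cells.any (fun c => c != "") then
          if st.2.2.1 = ([] : List String) then (some col_ranges, [], cells, st.2.2.2)
          else if cells != st.2.2.1 then (some col_ranges, [], st.2.2.1, st.2.2.2 ++ [cells])
          else (some col_ranges, [], st.2.2.1, st.2.2.2)
        else (some col_ranges, [], st.2.2.1, st.2.2.2)
  else (st.1, st.2.1 ++ [line], st.2.2.1, st.2.2.2)

def parse_grid_table_py_alt (lines : List String) : List String × List (List String) :=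
  let final := lines.foldl pvStepB (none, [], [], [])
  (final.2.2.1, final.2.2.2)

-- ===== PRECONDITION & SPEC =====
def Spec_parse_grid_table_py (lines : List String) (out : List String × List (List String)) : Prop := out = parse_grid_table_py_alt lines
instance (lines : List String) (out : List String × List (List String)) : Decidable (Spec_parse_grid_table_py lines out) := by unfold Spec_parse_grid_table_py; infer_instance

-- ===== CLAIM (what is proved, stated in full; the proofs are below) =====
def Claim_equal_parse_grid_table_py : Prop := ∀ (lines : List String), Dom_parse_grid_table_py lines → Spec_parse_grid_table_py lines (parse_grid_table_py lines)

-- ===== LEMMAS AND PROOFS =====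

-- indices (0-based) of the separator lines, recursively
def pvNatSep : List String → List Nat
  | [] => []
  | l :: ls => if pvIsSep l then 0 :: (pvNatSep ls).map (· + 1) else (pvNatSep ls).map (· + 1)

-- the blocks flushed by B when streaming over ls with current buffer buf (trailing buffer dropped)
def pvBlocks : List String → List String → List (List String)
  | [], _ => []
  | l :: ls, buf => if pvIsSep l then buf :: pvBlocks ls [] else pvBlocks ls (buf ++ [l])

-- the buffer left over at the end of the stream
def pvTrail : List String → List String → List String
  | [], buf => buf
  | l :: ls, buf => if pvIsSep l then pvTrail ls [] else pvTrail ls (buf ++ [l])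

-- column ranges extracted from a separator line (B's computation)
def pvRanges (line : String) : List (Int × Int) :=
  let starts : List Int :=
    ((PySem.List.enumerate (PySem.Str.rstrip line).toList 0).filter (fun p => p.2 == '+')).map (fun p => p.1)
  (starts.zip starts.tail).map (fun p => (p.1 + 1, p.2))

-- the headers/data_rows update applied to one block
def pvUpd (r : List (Int × Int)) (st : List String × List (List String)) (block : List String) :
    List String × List (List String) :=
  let cells := pvExtractCells r block
  if !(cells.any (fun c => c != "")) then st
  else if st.1 = ([] : List String) then (cells, st.2)
  else if cells == st.1 then st
  else (st.1, st.2 ++ [cells])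

theorem pvBlocks_nil (ls : List String) (h : pvNatSep ls = []) (buf : List String) :
    pvBlocks ls buf = [] := by
  induction ls generalizing buf with
  | nil => rfl
  | cons l ls ih =>
    by_cases hl : pvIsSep l
    · simp [pvNatSep, hl] at h
    · simp [pvNatSep, hl] at h
      simp [pvBlocks, hl, ih h]

theorem pvExtractCells_nil (block : List String) : pvExtractCells [] block = [] := by
  unfold pvExtractCells
  induction block with
  | nil => rfl
  | cons b bs ih => simpa [PySem.List.enumerate_nil] using ih

theorem pvUpd_nil (st : List String × List (List String)) (block : List String) :
    pvUpd [] st block = st := by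
  simp [pvUpd, pvExtractCells_nil]

theorem pvFoldUpd_nil (bl : List (List String)) (st : List String × List (List String)) :
    bl.foldl (pvUpd []) st = st := by
  induction bl generalizing st with
  | nil => rfl
  | cons b bs ih => simp [pvUpd_nil, ih]

theorem pvSepInts (ls : List String) (s : Int) :
    (((PySem.List.enumerate ls s).filter (fun p => pvIsSep p.2)).map (fun p => p.1)) =
      (pvNatSep ls).map (fun (i : Nat) => s + (i : Int)) := by
  induction ls generalizing s with
  | nil => simp [PySem.List.enumerate_nil, pvNatSep]
  | cons l ls ih =>
    rw [PySem.List.enumerate_cons]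
    by_cases hl : pvIsSep l
    · rw [List.filter_cons_of_pos (by simpa using hl), List.map_cons, ih (s+1)]
      simp only [pvNatSep, hl, if_pos, List.map_cons, List.map_map]
      refine congrArg₂ _ (by push_cast; ring) ?_
      apply List.map_congr_left; intro i _; simp only [Function.comp_apply]; push_cast; ring
    · rw [List.filter_cons_of_neg (by simpa using hl), ih (s+1)]
      simp only [pvNatSep, hl, Bool.false_eq_true, if_false, List.map_map]
      apply List.map_congr_left; intro i _; simp only [Function.comp_apply]; push_cast; ring

theorem pvPairs_eq_zip (a : List Int) (d : Int) :
    (PySem.List.pyRange 0 ((a.length : Int) - 1) 1).map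
        (fun j => (PySem.List.pyGetD a j d, PySem.List.pyGetD a (j + 1) d)) =
      a.zip a.tail := by
  rw [PySem.List.pyRange_one]
  apply List.ext_getElem
  · simp [List.length_zip]
  · intro j h1 h2
    simp only [List.getElem_map, List.getElem_range, List.getElem_zip]
    have hj : j < a.length - 1 := by
      simp at h1; omega
    have h1' : ((0:Int) + (j:Int)) = ((j:Nat):Int) := by ring
    have h2' : ((j:Int) + 1) = (((j+1:Nat)):Int) := by push_cast; ring
    rw [h1', h2', PySem.List.pyGetD_natCast, PySem.List.pyGetD_natCast]
    refine Prod.ext ?_ ?_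
    · simp only []
      rw [List.getD_eq_getElem a d (by omega)]
    · simp only []
      rw [List.getD_eq_getElem a d (by omega)]
      simp [List.getElem_tail]

theorem pvRangePairs (a : List Int) :
    (PySem.List.pyRange 0 ((a.length : Int) - 1) 1).map
        (fun j => (PySem.List.pyGetD a j 0 + 1, PySem.List.pyGetD a (j + 1) 0)) =
      (a.zip a.tail).map (fun p => (p.1 + 1, p.2)) := by
  rw [← pvPairs_eq_zip a 0, List.map_map]
  rfl

theorem pvFoldPairs {S : Type} (a : List Int) (g : S → Int → Int → S) (init : S) :
    (PySem.List.pyRange 0 ((a.length : Int) - 1) 1).foldl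
        (fun st j => g st (PySem.List.pyGetD a j 0) (PySem.List.pyGetD a (j + 1) 0)) init =
      (a.zip a.tail).foldl (fun st p => g st p.1 p.2) init := by
  rw [← pvPairs_eq_zip a 0, List.foldl_map]

theorem pvZipSlice (rest : List String) (buf : List String) (p : Nat) (lines : List String)
    (hdrop : lines.drop (p + 1) = buf ++ rest) :
    ((((p : Int) :: (pvNatSep rest).map (fun (i : Nat) => ((i + (p + 1 + buf.length) : Nat) : Int))).zip
        ((pvNatSep rest).map (fun (i : Nat) => ((i + (p + 1 + buf.length) : Nat) : Int)))).map
      (fun pr => PySem.List.slice lines (some (pr.1 + 1)) (some pr.2))) = pvBlocks rest buf := by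
  induction rest generalizing buf p with
  | nil => simp [pvNatSep, pvBlocks]
  | cons l ls ih =>
    by_cases hl : pvIsSep l
    · simp only [pvNatSep, hl, if_pos, pvBlocks, List.map_cons, List.map_map]
      rw [List.zip_cons_cons, List.map_cons]
      have hq : ((0 + (p + 1 + buf.length) : Nat) : Int) = ((p + 1 + buf.length : Nat) : Int) := by
        norm_num
      refine congrArg₂ _ ?_ ?_
      · rw [hq]
        have hc : ((p:Int) + 1) = ((p+1 : Nat) : Int) := by push_cast; ring
        rw [hc, PySem.List.slice_natCast, hdrop]
        have hlen : (p + 1 + buf.length) - (p+1) = buf.length := by omega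
        rw [hlen, List.take_left]
      · have hdrop' : lines.drop (p + 1 + buf.length + 1) = [] ++ ls := by
          have hx : p + 1 + buf.length + 1 = (p+1) + (buf.length + 1) := by omega
          rw [hx, ← List.drop_drop, hdrop]
          simp
        have hIH := ih [] (p + 1 + buf.length) hdrop'
        simp only [List.length_nil] at hIH
        rw [hq]
        have hM : (pvNatSep ls).map ((fun (i : Nat) => ((i + (p + 1 + buf.length) : Nat) : Int)) ∘ (fun x => x + 1)) =
            (pvNatSep ls).map (fun (i : Nat) => ((i + (p + 1 + buf.length + 1 + 0) : Nat) : Int)) := by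
          apply List.map_congr_left; intro i _
          simp only [Function.comp_apply]
          congr 1
          omega
        rw [hM]
        exact hIH
    · simp only [pvNatSep, hl, Bool.false_eq_true, if_false, pvBlocks, List.map_map]
      have hdrop' : lines.drop (p + 1) = (buf ++ [l]) ++ ls := by
        rw [hdrop]; simp
      have hIH := ih (buf ++ [l]) p hdrop'
      simp only [List.length_append, List.length_cons, List.length_nil] at hIH
      have hM : (pvNatSep ls).map ((fun (i : Nat) => ((i + (p + 1 + buf.length) : Nat) : Int)) ∘ (fun x => x + 1)) =
          (pvNatSep ls).map (fun (i : Nat) => ((i + (p + 1 + (buf.length + (0 + 1))) : Nat) : Int)) := by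
        apply List.map_congr_left; intro i _
        simp only [Function.comp_apply]
        congr 1
        omega
      rw [hM]
      exact hIH

theorem pvStepB_sep (r : List (Int × Int)) (buf : List String) (h : List String)
    (dr : List (List String)) (line : String) (hl : pvIsSep line = true) :
    pvStepB (some r, buf, h, dr) line = (some r, [], pvUpd r (h, dr) buf) := by
  unfold pvStepB pvUpd
  rw [if_pos hl]
  simp only []
  set cells := pvExtractCells r buf with hc
  by_cases h1 : (cells.any fun c => c != "") = true
  · simp only [h1, Bool.not_true, Bool.false_eq_true, if_false, if_true]
    by_cases h2 : h = ([] : List String)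
    · rw [if_pos h2, if_pos h2]
    · rw [if_neg h2, if_neg h2]
      by_cases h3 : cells = h
      · have hx : ¬((cells != h) = true) := by simp [h3]
        have hy : (cells == h) = true := by simp [h3]
        rw [if_neg hx, if_pos hy]
      · have hx : (cells != h) = true := by simp [h3]
        have hy : ¬((cells == h) = true) := by simp [h3]
        rw [if_pos hx, if_neg hy]
  · simp only [Bool.not_eq_true] at h1
    simp only [h1, Bool.not_false, Bool.false_eq_true, if_false, if_true]

theorem pvB_flush (ls : List String) (r : List (Int × Int)) (buf : List String)
    (h : List String) (dr : List (List String)) :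
    ls.foldl pvStepB (some r, buf, h, dr) =
      (some r, pvTrail ls buf, (pvBlocks ls buf).foldl (pvUpd r) (h, dr)) := by
  induction ls generalizing buf h dr with
  | nil => simp [pvTrail, pvBlocks]
  | cons l ls ih =>
    by_cases hl : pvIsSep l
    · rw [List.foldl_cons, pvStepB_sep r buf h dr l hl]
      have hp : pvUpd r (h, dr) buf = ((pvUpd r (h, dr) buf).1, (pvUpd r (h, dr) buf).2) := rfl
      rw [hp, ih]
      simp [pvTrail, pvBlocks, hl]
    · rw [List.foldl_cons]
      have hstep : pvStepB (some r, buf, h, dr) l = (some r, buf ++ [l], h, dr) := by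
        unfold pvStepB
        rw [if_neg (by simp [hl])]
      rw [hstep, ih]
      simp [pvTrail, pvBlocks, hl]

theorem pvB_run_none (pre : List String) (hp : ∀ l ∈ pre, pvIsSep l = false) (buf : List String) :
    pre.foldl pvStepB (none, buf, [], []) = (none, buf ++ pre, [], []) := by
  induction pre generalizing buf with
  | nil => simp
  | cons l ls ih =>
    have hl : pvIsSep l = false := hp l (by simp)
    rw [List.foldl_cons]
    have hstep : pvStepB (none, buf, [], []) l = (none, buf ++ [l], [], []) := by
      unfold pvStepB
      rw [if_neg (by simp [hl])]
    rw [hstep, ih (fun x hx => hp x (by simp [hx]))]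
    simp

theorem pvB_char_nosep (lines : List String) (hp : ∀ l ∈ lines, pvIsSep l = false) :
    parse_grid_table_py_alt lines = ([], []) := by
  unfold parse_grid_table_py_alt
  rw [pvB_run_none lines hp []]

theorem pvB_char (pre : List String) (s : String) (rest : List String)
    (hpre : ∀ l ∈ pre, pvIsSep l = false) (hs : pvIsSep s = true) :
    parse_grid_table_py_alt (pre ++ s :: rest) =
      (pvBlocks rest []).foldl (pvUpd (pvRanges s)) ([], []) := by
  unfold parse_grid_table_py_alt
  rw [List.foldl_append, pvB_run_none pre hpre [], List.foldl_cons]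
  have hstep : pvStepB (none, [] ++ pre, [], []) s = (some (pvRanges s), [], [], []) := by
    unfold pvStepB
    rw [if_pos hs]
    rfl
  rw [hstep, pvB_flush]

theorem pvNatSep_append (pre : List String) (s : String) (rest : List String)
    (hpre : ∀ l ∈ pre, pvIsSep l = false) (hs : pvIsSep s = true) :
    pvNatSep (pre ++ s :: rest) =
      pre.length :: (pvNatSep rest).map (fun i => i + (pre.length + 1)) := by
  induction pre with
  | nil =>
    simp [pvNatSep, hs]
  | cons l pre ih =>
    have hl : pvIsSep l = false := hpre l (by simp)
    have hih := ih (fun x hx => hpre x (by simp [hx]))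
    simp only [List.cons_append, pvNatSep, hl, Bool.false_eq_true, if_false, hih,
      List.map_cons, List.map_map, List.length_cons]
    refine congrArg₂ _ (by omega) (List.map_congr_left fun i _ => by
      simp only [Function.comp_apply]; omega)

theorem pvNatSep_nil_of (ls : List String) (hp : ∀ l ∈ ls, pvIsSep l = false) :
    pvNatSep ls = [] := by
  induction ls with
  | nil => rfl
  | cons l ls ih =>
    simp [pvNatSep, hp l (by simp), ih (fun x hx => hp x (by simp [hx]))]

theorem pvA_char_nosep (lines : List String) (hp : ∀ l ∈ lines, pvIsSep l = false) :
    parse_grid_table_py lines = ([], []) := by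
  unfold parse_grid_table_py
  rw [pvSepInts lines 0, pvNatSep_nil_of lines hp]
  simp

theorem pvA_char (pre : List String) (s : String) (rest : List String)
    (hpre : ∀ l ∈ pre, pvIsSep l = false) (hs : pvIsSep s = true) :
    parse_grid_table_py (pre ++ s :: rest) =
      (pvBlocks rest []).foldl (pvUpd (pvRanges s)) ([], []) := by
  have hdrop : (pre ++ s :: rest).drop (pre.length + 1) = [] ++ rest := by
    simp [List.drop_append]
  simp only [parse_grid_table_py]
  rw [pvSepInts _ 0, pvNatSep_append pre s rest hpre hs]
  simp only [List.map_cons, List.map_map]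
  have hJ : ((pvNatSep rest).map ((fun (i : Nat) => (0:Int) + (i : Int)) ∘ (fun i => i + (pre.length + 1)))) =
      (pvNatSep rest).map (fun (i : Nat) => ((i + (pre.length + 1) : Nat) : Int)) := by
    apply List.map_congr_left; intro i _
    simp only [Function.comp_apply]
    push_cast; ring
  rw [hJ, zero_add]
  cases hns : pvNatSep rest with
  | nil =>
    rw [pvBlocks_nil rest hns]
    simp
  | cons i0 I =>
    rw [if_neg (by simp)]
    rw [PySem.List.pyGetD_zero_cons]
    have hgl : PySem.List.pyGetD (pre ++ s :: rest) ((pre.length : Nat) : Int) "" = s := by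
      rw [PySem.List.pyGetD_natCast]
      simp
    rw [hgl]
    set S : List Int := ((PySem.List.enumerate (PySem.Str.rstrip s).toList 0).filter
        (fun p => p.2 == '+')).map (fun p => p.1) with hSdef
    have hR : pvRanges s = (S.zip S.tail).map (fun q => (q.1 + 1, q.2)) := by
      simp only [pvRanges]
      rw [← hSdef]
    by_cases hS2 : S.length < 2
    · rw [if_pos hS2]
      have hr : pvRanges s = [] := by
        rw [hR]
        clear_value S
        match S, hS2 with
        | [], _ => simp
        | [x], _ => simp
        | x :: y :: t, h => simp at h
      rw [hr, pvFoldUpd_nil]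
    · rw [if_neg hS2]
      rw [pvRangePairs S, ← hR]
      have hZ := pvZipSlice rest [] pre.length (pre ++ s :: rest) hdrop
      simp only [List.length_nil, Nat.add_zero] at hZ
      rw [hns] at hZ
      have h1 := pvFoldPairs (S := List String × List (List String))
        (((pre.length : Nat) : Int) :: (i0 :: I).map (fun (i : Nat) => ((i + (pre.length + 1) : Nat) : Int)))
        (fun st x y => pvUpd (pvRanges s) st
          (PySem.List.slice (pre ++ s :: rest) (some (x + 1)) (some y))) ([], [])
      refine h1.trans ?_
      rw [← hZ, List.foldl_map]
      rfl

-- ===== VERDICT (by name: the statement is the Claim_ definition above) =====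
theorem parse_grid_table_py_spec : Claim_equal_parse_grid_table_py := by
  intro lines _
  unfold Spec_parse_grid_table_py
  rcases h : lines.dropWhile (fun l => !pvIsSep l) with _ | ⟨s, rest⟩
  · have hall : ∀ l ∈ lines, pvIsSep l = false := by
      intro l hl
      have := List.dropWhile_eq_nil_iff.mp h l hl
      simpa using this
    rw [pvA_char_nosep lines hall, pvB_char_nosep lines hall]
  · have hsplit : lines = lines.takeWhile (fun l => !pvIsSep l) ++ s :: rest := by
      conv_lhs => rw [← List.takeWhile_append_dropWhile (p := fun l => !pvIsSep l) (l := lines)]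
      rw [h]
    have hpre : ∀ l ∈ lines.takeWhile (fun l => !pvIsSep l), pvIsSep l = false := by
      intro l hl
      have := List.mem_takeWhile_imp hl
      simpa using this
    have hs : pvIsSep s = true := by
      have := List.head?_dropWhile_not (p := fun l => !pvIsSep l) (l := lines)
      rw [h] at this
      simpa using this
    rw [hsplit, pvA_char _ _ _ hpre hs, pvB_char _ _ _ hpre hs]
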